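-- pv_equiv track=rewrite | github.com/DigitalVigilantes/Hacking | Dona formigaERRO1.py | max_rooms_visited
-- ===== SOURCE A (Python) =====
-- from collections import defaultdict
--
-- def max_rooms_visited(S, T, P, heights, tunnels):
--     graph = defaultdict(list)
--     for i, j in tunnels:
--         if heights[i-1] > heights[j-1]:
--             graph[i].append(j)
--         elif heights[j-1] > heights[i-1]:
--             graph[j].append(i)
--
--     visited = set()
--     stack = [P]
--     while stack:
--         node = stack.pop()
--         if node not in visited:
--             visited.add(node)
--             stack.extend(graph[node])
--     return len(visited) - 1
-- ===== SOURCE B (Python) =====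
-- def max_rooms_visited(S, T, P, heights, tunnels):
--     # directed edge list: higher room -> lower room
--     edges = []
--     for i, j in tunnels:
--         if heights[i - 1] > heights[j - 1]:
--             edges.append((i, j))
--         elif heights[j - 1] > heights[i - 1]:
--             edges.append((j, i))
--     # fixpoint saturation: relax edges until nothing new becomes reachable
--     visited = {P}
--     changed = True
--     while changed:
--         changed = False
--         for u, v in edges:
--             if u in visited and v not in visited:
--                 visited.add(v)
--                 changed = True
--     return len(visited) - 1
-- ===== Notes on version B (the rewrite author's own statement) =====
-- stated objective: alternative
-- what changed: A builds an adjacency dict and runs an explicit-stack DFS; B keeps only the plain directed edge list and computes the reachable set by repeated edge relaxation to a fixpoint (Bellman-Ford-style saturation), with no adjacency structure and no stack.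
import Mathlib
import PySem

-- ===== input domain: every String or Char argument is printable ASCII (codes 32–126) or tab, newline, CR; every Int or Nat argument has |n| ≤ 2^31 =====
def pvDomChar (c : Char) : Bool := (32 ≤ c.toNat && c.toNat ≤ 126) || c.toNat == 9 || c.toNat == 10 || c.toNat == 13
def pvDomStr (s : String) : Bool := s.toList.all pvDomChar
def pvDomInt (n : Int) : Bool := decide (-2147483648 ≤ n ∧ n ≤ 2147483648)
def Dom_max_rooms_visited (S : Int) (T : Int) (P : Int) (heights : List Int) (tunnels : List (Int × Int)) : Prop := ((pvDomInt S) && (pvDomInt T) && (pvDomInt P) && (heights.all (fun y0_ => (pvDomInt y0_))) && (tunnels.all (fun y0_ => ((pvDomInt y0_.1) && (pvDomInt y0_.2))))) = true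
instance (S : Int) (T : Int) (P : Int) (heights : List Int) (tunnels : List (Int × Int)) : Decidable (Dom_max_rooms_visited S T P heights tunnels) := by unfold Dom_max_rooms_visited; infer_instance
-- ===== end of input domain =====

-- B replaces A's adjacency-dict + explicit-stack DFS by a plain directed edge list saturated
-- to a fixpoint by repeated edge relaxation (objective: alternative algorithm, same result).

-- ===== PORT A =====
-- defaultdict(list) built by appending the lower room under the higher room of each tunnel
def pvBuildGraphA (heights : List Int) (tunnels : List (Int × Int)) : PySem.Dict Int (List Int) :=
  tunnels.foldl (fun d p =>
    match PySem.List.pyGet? heights (p.1 - 1), PySem.List.pyGet? heights (p.2 - 1) with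
    | some a, some b =>
        if a > b then d.modify p.1 [] (fun l => l ++ [p.2])
        else if b > a then d.modify p.2 [] (fun l => l ++ [p.1])
        else d
    | _, _ => d) PySem.Dict.empty

-- the 'while stack:' loop; fuel (tunnels.length + 1) only makes the recursion structural,
-- it is proved sufficient below (the loop pops at most 1 + number-of-directed-edges times)
def pvLoopA (g : PySem.Dict Int (List Int)) : Nat → PySem.Set Int → List Int → PySem.Set Int
  | 0, visited, _ => visited
  | fuel + 1, visited, stack =>
    match PySem.List.pop? stack (-1) with
    | none => visited
    | some (node, rest) =>
        if PySem.Set.contains visited node then pvLoopA g fuel visited rest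
        else pvLoopA g fuel (PySem.Set.add visited node) (rest ++ g.getD node [])

def max_rooms_visited (S : Int) (T : Int) (P : Int) (heights : List Int) (tunnels : List (Int × Int)) : Int :=
  let graph := pvBuildGraphA heights tunnels
  let visited := pvLoopA graph (tunnels.length + 1) PySem.Set.empty [P]
  PySem.Set.len visited - 1

-- ===== PORT B =====
-- directed edge list: higher room -> lower room
def pvEdgesB (heights : List Int) (tunnels : List (Int × Int)) : List (Int × Int) :=
  tunnels.foldl (fun es p =>
    match PySem.List.pyGet? heights (p.1 - 1), PySem.List.pyGet? heights (p.2 - 1) with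
    | some a, some b =>
        if a > b then es ++ [(p.1, p.2)]
        else if b > a then es ++ [(p.2, p.1)]
        else es
    | _, _ => es) []

-- one 'for u, v in edges:' relaxation round; the Bool is the 'changed' flag
def pvRelaxB (edges : List (Int × Int)) (visited : PySem.Set Int) : PySem.Set Int × Bool :=
  edges.foldl (fun acc e =>
    if PySem.Set.contains acc.1 e.1 && !PySem.Set.contains acc.1 e.2
    then (PySem.Set.add acc.1 e.2, true) else acc) (visited, false)

-- the 'while changed:' loop; fuel (edges.length + 1) only makes the recursion structural,
-- it is proved sufficient below (every changing round visits a new edge target)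
def pvSaturB (edges : List (Int × Int)) : Nat → PySem.Set Int → PySem.Set Int
  | 0, visited => visited
  | fuel + 1, visited =>
      let r := pvRelaxB edges visited
      if r.2 then pvSaturB edges fuel r.1 else r.1

def max_rooms_visited_alt (S : Int) (T : Int) (P : Int) (heights : List Int) (tunnels : List (Int × Int)) : Int :=
  let edges := pvEdgesB heights tunnels
  let visited := pvSaturB edges (edges.length + 1) (PySem.Set.add PySem.Set.empty P)
  PySem.Set.len visited - 1

-- ===== PRECONDITION & SPEC =====
-- Pre_ excludes exactly the inputs where Python A raises IndexError: a tunnel endpoint i with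
-- heights[i-1] out of range (negative wraparound indices are in range and admitted).
def Pre_max_rooms_visited (S : Int) (T : Int) (P : Int) (heights : List Int) (tunnels : List (Int × Int)) : Prop :=
  ∀ p ∈ tunnels, PySem.Raise.InRange heights.length (p.1 - 1) ∧ PySem.Raise.InRange heights.length (p.2 - 1)
instance (S : Int) (T : Int) (P : Int) (heights : List Int) (tunnels : List (Int × Int)) : Decidable (Pre_max_rooms_visited S T P heights tunnels) := by unfold Pre_max_rooms_visited; infer_instance
def pvWitness_max_rooms_visited : Int × Int × Int × List Int × (List (Int × Int)) :=
  (3, 2, 1, [3, 2, 1], [(1, 2), (2, 3)])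
def Spec_max_rooms_visited (S : Int) (T : Int) (P : Int) (heights : List Int) (tunnels : List (Int × Int)) (out : Int) : Prop := out = max_rooms_visited_alt S T P heights tunnels
instance (S : Int) (T : Int) (P : Int) (heights : List Int) (tunnels : List (Int × Int)) (out : Int) : Decidable (Spec_max_rooms_visited S T P heights tunnels out) := by unfold Spec_max_rooms_visited; infer_instance

-- ===== CLAIM (what is proved, stated in full; the proofs are below) =====
def Claim_equal_max_rooms_visited : Prop := ∀ (S : Int) (T : Int) (P : Int) (heights : List Int) (tunnels : List (Int × Int)), Dom_max_rooms_visited S T P heights tunnels → Pre_max_rooms_visited S T P heights tunnels → Spec_max_rooms_visited S T P heights tunnels (max_rooms_visited S T P heights tunnels)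

-- ===== LEMMAS AND PROOFS =====

-- the directed edges of one tunnel, and of the whole tunnel list (proof-side view of both ports)
def pvStep1 (heights : List Int) (p : Int × Int) : List (Int × Int) :=
  match PySem.List.pyGet? heights (p.1 - 1), PySem.List.pyGet? heights (p.2 - 1) with
  | some a, some b =>
      if a > b then [(p.1, p.2)] else if b > a then [(p.2, p.1)] else []
  | _, _ => []

def pvDirE (heights : List Int) (tunnels : List (Int × Int)) : List (Int × Int) :=
  tunnels.flatMap (pvStep1 heights)

-- reachability along the directed edges
inductive pvReach (E : List (Int × Int)) : Int → Int → Prop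
  | refl (u : Int) : pvReach E u u
  | tail {u v w : Int} : pvReach E u v → (v, w) ∈ E → pvReach E u w

theorem pvEdgesB_aux (heights : List Int) (tunnels : List (Int × Int)) :
    ∀ es : List (Int × Int),
      tunnels.foldl (fun es p =>
        match PySem.List.pyGet? heights (p.1 - 1), PySem.List.pyGet? heights (p.2 - 1) with
        | some a, some b =>
            if a > b then es ++ [(p.1, p.2)]
            else if b > a then es ++ [(p.2, p.1)]
            else es
        | _, _ => es) es = es ++ pvDirE heights tunnels := by
  induction tunnels with
  | nil => intro es; simp [pvDirE]
  | cons p tl ih =>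
    intro es
    simp only [List.foldl_cons, pvDirE, List.flatMap_cons]
    rw [show (match PySem.List.pyGet? heights (p.1 - 1), PySem.List.pyGet? heights (p.2 - 1) with
        | some a, some b =>
            if a > b then es ++ [(p.1, p.2)]
            else if b > a then es ++ [(p.2, p.1)]
            else es
        | _, _ => es) = es ++ pvStep1 heights p by
      unfold pvStep1
      rcases PySem.List.pyGet? heights (p.1 - 1) with _ | a <;>
        rcases PySem.List.pyGet? heights (p.2 - 1) with _ | b <;> simp <;> split_ifs <;> simp]
    rw [ih]
    simp [pvDirE, List.append_assoc]

theorem pvEdgesB_eq (heights : List Int) (tunnels : List (Int × Int)) :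
    pvEdgesB heights tunnels = pvDirE heights tunnels := by
  simpa using pvEdgesB_aux heights tunnels []

theorem pvBuildGraphA_aux (heights : List Int) (tunnels : List (Int × Int)) :
    ∀ d : PySem.Dict Int (List Int),
      tunnels.foldl (fun d p =>
        match PySem.List.pyGet? heights (p.1 - 1), PySem.List.pyGet? heights (p.2 - 1) with
        | some a, some b =>
            if a > b then d.modify p.1 [] (fun l => l ++ [p.2])
            else if b > a then d.modify p.2 [] (fun l => l ++ [p.1])
            else d
        | _, _ => d) d =
      (pvDirE heights tunnels).foldl (fun d p => d.modify p.1 [] (fun l => l ++ [p.2])) d := by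
  induction tunnels with
  | nil => intro d; simp [pvDirE]
  | cons p tl ih =>
    intro d
    simp only [List.foldl_cons, pvDirE, List.flatMap_cons, List.foldl_append]
    rw [show (match PySem.List.pyGet? heights (p.1 - 1), PySem.List.pyGet? heights (p.2 - 1) with
        | some a, some b =>
            if a > b then d.modify p.1 [] (fun l => l ++ [p.2])
            else if b > a then d.modify p.2 [] (fun l => l ++ [p.1])
            else d
        | _, _ => d) =
        (pvStep1 heights p).foldl (fun d p => d.modify p.1 [] (fun l => l ++ [p.2])) d by
      unfold pvStep1
      rcases PySem.List.pyGet? heights (p.1 - 1) with _ | a <;>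
        rcases PySem.List.pyGet? heights (p.2 - 1) with _ | b <;> simp <;> split_ifs <;> simp]
    exact ih _

theorem pvBuildGraphA_eq (heights : List Int) (tunnels : List (Int × Int)) :
    pvBuildGraphA heights tunnels =
      (pvDirE heights tunnels).foldl (fun d p => d.modify p.1 [] (fun l => l ++ [p.2])) PySem.Dict.empty := by
  simpa [pvBuildGraphA] using pvBuildGraphA_aux heights tunnels PySem.Dict.empty

theorem pvMem_adjA (heights : List Int) (tunnels : List (Int × Int)) (u v : Int) :
    v ∈ (pvBuildGraphA heights tunnels).getD u [] ↔ (u, v) ∈ pvDirE heights tunnels := by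
  rw [pvBuildGraphA_eq, PySem.Dict.getD_foldl_modify_append]
  simp only [PySem.Dict.getD_empty, List.nil_append, List.mem_map, List.mem_filter]
  constructor
  · rintro ⟨⟨a, b⟩, ⟨hm, he⟩, rfl⟩
    simpa [show a = u by simpa using he] using hm
  · intro h
    exact ⟨(u, v), ⟨h, by simp⟩, rfl⟩

theorem pvDirE_length_le (heights : List Int) (tunnels : List (Int × Int)) :
    (pvDirE heights tunnels).length ≤ tunnels.length := by
  induction tunnels with
  | nil => simp [pvDirE]
  | cons p tl ih =>
    simp only [pvDirE, List.flatMap_cons, List.length_append, List.length_cons]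
    have h1 : (pvStep1 heights p).length ≤ 1 := by
      unfold pvStep1
      rcases PySem.List.pyGet? heights (p.1 - 1) with _ | a <;>
        rcases PySem.List.pyGet? heights (p.2 - 1) with _ | b <;> simp <;> split_ifs <;> simp
    have := ih
    simp only [pvDirE] at this
    omega

-- rewrite forms of the A loop
theorem pvLoopA_nil (g : PySem.Dict Int (List Int)) (fuel : Nat) (vis : PySem.Set Int) :
    pvLoopA g (fuel + 1) vis [] = vis := by
  simp [pvLoopA, PySem.List.pop?]

theorem pvLoopA_concat (g : PySem.Dict Int (List Int)) (fuel : Nat) (vis : PySem.Set Int)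
    (ys : List Int) (y : Int) :
    pvLoopA g (fuel + 1) vis (ys ++ [y]) =
      if PySem.Set.contains vis y then pvLoopA g fuel vis ys
      else pvLoopA g fuel (PySem.Set.add vis y) (ys ++ g.getD y []) := by
  simp [pvLoopA, PySem.List.pop?_last]

theorem pvLoopA_mono (g : PySem.Dict Int (List Int)) :
    ∀ (fuel : Nat) (vis : PySem.Set Int) (stack : List Int) (x : Int),
      x ∈ vis → x ∈ pvLoopA g fuel vis stack := by
  intro fuel
  induction fuel with
  | zero => intro vis stack x hx; simpa [pvLoopA] using hx
  | succ f ih =>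
    intro vis stack x hx
    rcases stack.eq_nil_or_concat with rfl | ⟨ys, y, rfl⟩
    all_goals try simp only [List.concat_eq_append] at *
    · simpa [pvLoopA_nil] using hx
    · rw [pvLoopA_concat]
      split_ifs
      · exact ih _ _ _ hx
      · exact ih _ _ _ ((PySem.Set.mem_add _ _ _).2 (Or.inl hx))

theorem pvLoopA_sound (g : PySem.Dict Int (List Int)) (E : List (Int × Int))
    (hadj : ∀ u v : Int, v ∈ g.getD u [] → (u, v) ∈ E)
    (R : Int → Prop) (hR : ∀ u v : Int, R u → (u, v) ∈ E → R v) :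
    ∀ (fuel : Nat) (vis : PySem.Set Int) (stack : List Int),
      (∀ x ∈ vis, R x) → (∀ x ∈ stack, R x) →
      ∀ x ∈ pvLoopA g fuel vis stack, R x := by
  intro fuel
  induction fuel with
  | zero => intro vis stack hv _ x hx; exact hv x (by simpa [pvLoopA] using hx)
  | succ f ih =>
    intro vis stack hv hs x hx
    rcases stack.eq_nil_or_concat with rfl | ⟨ys, y, rfl⟩
    all_goals try simp only [List.concat_eq_append] at *
    · exact hv x (by simpa [pvLoopA_nil] using hx)
    · rw [pvLoopA_concat] at hx
      have hys : ∀ z ∈ ys, R z := fun z hz => hs z (by simp [hz])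
      have hy : R y := hs y (by simp)
      split_ifs at hx
      · exact ih vis ys hv hys x hx
      · refine ih _ _ ?_ ?_ x hx
        · intro z hz
          rcases (PySem.Set.mem_add _ _ _).1 hz with h | rfl
          · exact hv z h
          · exact hy
        · intro z hz
          rcases List.mem_append.1 hz with h | h
          · exact hys z h
          · exact hR y z hy (hadj y z h)

theorem pvLoopA_nodup (g : PySem.Dict Int (List Int)) :
    ∀ (fuel : Nat) (vis : PySem.Set Int) (stack : List Int),
      vis.Nodup → (pvLoopA g fuel vis stack).Nodup := by
  intro fuel
  induction fuel with
  | zero => intro vis stack h; simpa [pvLoopA] using h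
  | succ f ih =>
    intro vis stack h
    rcases stack.eq_nil_or_concat with rfl | ⟨ys, y, rfl⟩
    all_goals try simp only [List.concat_eq_append] at *
    · simpa [pvLoopA_nil] using h
    · rw [pvLoopA_concat]
      split_ifs
      · exact ih _ _ h
      · exact ih _ _ (PySem.Set.nodup_add _ _ h)

-- fuel potential for the A loop: directed edges whose source is not yet visited
def pvRemA (E : List (Int × Int)) (vis : List Int) : Nat :=
  (E.filter (fun e => decide (e.1 ∉ vis))).length

theorem pvFilterSplit {α : Type} (l : List α) (p q : α → Bool)
    (h : ∀ a ∈ l, q a = true → p a = true) :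
    (l.filter p).length = (l.filter (fun a => p a && !q a)).length + (l.filter q).length := by
  induction l with
  | nil => simp
  | cons a tl ih =>
    have ht : ∀ b ∈ tl, q b = true → p b = true := fun b hb => h b (List.mem_cons_of_mem a hb)
    have ha := h a (List.mem_cons_self)
    cases hq : q a <;> cases hp : p a <;>
      simp [List.filter_cons, hq, hp, ih ht] <;> simp [hq, hp] at ha ⊢ <;> omega

theorem pvRemA_add (E : List (Int × Int)) (vis : PySem.Set Int) (y : Int) (hy : y ∉ vis) :
    pvRemA E vis = pvRemA E (PySem.Set.add vis y) + (E.filter (fun e => e.1 == y)).length := by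
  unfold pvRemA
  have hsplit := pvFilterSplit E (fun e => decide (e.1 ∉ vis)) (fun e => e.1 == y)
    (by intro a _ hq; simp at hq ⊢; rw [hq]; exact hy)
  have hcong : E.filter (fun a => decide (a.1 ∉ vis) && !(a.1 == y)) =
      E.filter (fun e => decide (e.1 ∉ PySem.Set.add vis y)) := by
    apply List.filter_congr
    intro a _
    by_cases h1 : a.1 ∈ vis <;> by_cases h2 : a.1 = y <;>
      simp [h1, h2, PySem.Set.mem_add]
  rw [hsplit, hcong]

theorem pvLoopA_complete (g : PySem.Dict Int (List Int)) (E : List (Int × Int))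
    (hadj : ∀ u : Int, g.getD u [] = (E.filter (fun e => e.1 == u)).map (fun e => e.2)) :
    ∀ (fuel : Nat) (vis : PySem.Set Int) (stack : List Int),
      (∀ u ∈ vis, ∀ v : Int, (u, v) ∈ E → v ∈ vis ∨ v ∈ stack) →
      stack.length + pvRemA E vis ≤ fuel →
      (∀ x ∈ stack, x ∈ pvLoopA g fuel vis stack) ∧
      (∀ u ∈ pvLoopA g fuel vis stack, ∀ v : Int, (u, v) ∈ E → v ∈ pvLoopA g fuel vis stack) := by
  intro fuel
  induction fuel with
  | zero =>
    intro vis stack hinv hfuel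
    have hstack : stack = [] := List.eq_nil_of_length_eq_zero (by omega)
    subst hstack
    refine ⟨by simp, ?_⟩
    intro u hu v hv
    simp only [pvLoopA] at hu ⊢
    rcases hinv u hu v hv with h | h
    · exact h
    · simp at h
  | succ f ih =>
    intro vis stack hinv hfuel
    rcases stack.eq_nil_or_concat with rfl | ⟨ys, y, rfl⟩
    all_goals try simp only [List.concat_eq_append] at *
    · rw [pvLoopA_nil]
      refine ⟨by simp, ?_⟩
      intro u hu v hv
      rcases hinv u hu v hv with h | h
      · exact h
      · simp at h
    · rw [pvLoopA_concat]
      by_cases hy : y ∈ vis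
      · rw [if_pos ((PySem.Set.contains_iff _ _).2 hy)]
        have hinv' : ∀ u ∈ vis, ∀ v : Int, (u, v) ∈ E → v ∈ vis ∨ v ∈ ys := by
          intro u hu v hv
          rcases hinv u hu v hv with h | h
          · exact Or.inl h
          · rcases List.mem_append.1 h with h | h
            · exact Or.inr h
            · exact Or.inl (by simpa using (List.mem_singleton.1 h) ▸ hy)
        have hfuel' : ys.length + pvRemA E vis ≤ f := by
          simp only [List.length_append, List.length_cons, List.length_nil] at hfuel; omega
        obtain ⟨h1, h2⟩ := ih vis ys hinv' hfuel'
        refine ⟨?_, h2⟩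
        intro x hx
        rcases List.mem_append.1 hx with h | h
        · exact h1 x h
        · exact (List.mem_singleton.1 h) ▸ pvLoopA_mono g f vis ys y hy
      · rw [if_neg (by simpa [PySem.Set.contains_iff] using hy)]
        have hinv' : ∀ u ∈ PySem.Set.add vis y, ∀ v : Int,
            (u, v) ∈ E → v ∈ PySem.Set.add vis y ∨ v ∈ ys ++ g.getD y [] := by
          intro u hu v hv
          rcases (PySem.Set.mem_add _ _ _).1 hu with h | rfl
          · rcases hinv u h v hv with h' | h'
            · exact Or.inl ((PySem.Set.mem_add _ _ _).2 (Or.inl h'))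
            · rcases List.mem_append.1 h' with h' | h'
              · exact Or.inr (List.mem_append.2 (Or.inl h'))
              · exact Or.inl ((PySem.Set.mem_add _ _ _).2 (Or.inr (List.mem_singleton.1 h')))
          · refine Or.inr (List.mem_append.2 (Or.inr ?_))
            rw [hadj]
            exact List.mem_map.2 ⟨(u, v), List.mem_filter.2 ⟨hv, by simp⟩, rfl⟩
        have hlen : (g.getD y []).length = (E.filter (fun e => e.1 == y)).length := by
          rw [hadj]; simp
        have hfuel' : (ys ++ g.getD y []).length + pvRemA E (PySem.Set.add vis y) ≤ f := by
          have := pvRemA_add E vis y hy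
          simp only [List.length_append, List.length_cons, List.length_nil] at hfuel ⊢
          omega
        obtain ⟨h1, h2⟩ := ih (PySem.Set.add vis y) (ys ++ g.getD y []) hinv' hfuel'
        refine ⟨?_, h2⟩
        intro x hx
        rcases List.mem_append.1 hx with h | h
        · exact h1 x (List.mem_append.2 (Or.inl h))
        · have hx : x = y := List.mem_singleton.1 h
          subst hx
          exact pvLoopA_mono g f _ _ x ((PySem.Set.mem_add _ _ _).2 (Or.inr rfl))

-- B side: one relaxation step, and facts about a relaxation round
def pvStepB (acc : PySem.Set Int × Bool) (e : Int × Int) : PySem.Set Int × Bool :=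
  if PySem.Set.contains acc.1 e.1 && !PySem.Set.contains acc.1 e.2
  then (PySem.Set.add acc.1 e.2, true) else acc

theorem pvRelaxB_eq (edges : List (Int × Int)) (vis : PySem.Set Int) :
    pvRelaxB edges vis = edges.foldl pvStepB (vis, false) := rfl

theorem pvFoldB_mono (l : List (Int × Int)) :
    ∀ (acc : PySem.Set Int × Bool) (x : Int), x ∈ acc.1 → x ∈ (l.foldl pvStepB acc).1 := by
  induction l with
  | nil => intro acc x hx; simpa using hx
  | cons e tl ih =>
    intro acc x hx
    simp only [List.foldl_cons]
    refine ih _ x ?_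
    unfold pvStepB
    split_ifs
    · exact (PySem.Set.mem_add _ _ _).2 (Or.inl hx)
    · exact hx

theorem pvFoldB_flag (l : List (Int × Int)) :
    ∀ acc : PySem.Set Int × Bool, acc.2 = true → (l.foldl pvStepB acc).2 = true := by
  induction l with
  | nil => intro acc h; simpa using h
  | cons e tl ih =>
    intro acc h
    simp only [List.foldl_cons]
    refine ih _ ?_
    unfold pvStepB
    split_ifs <;> simp [h]

theorem pvFoldB_sound (E : List (Int × Int)) (R : Int → Prop)
    (hR : ∀ u v : Int, R u → (u, v) ∈ E → R v) :
    ∀ (l : List (Int × Int)), (∀ e ∈ l, e ∈ E) →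
      ∀ (acc : PySem.Set Int × Bool), (∀ x ∈ acc.1, R x) →
      ∀ x ∈ (l.foldl pvStepB acc).1, R x := by
  intro l
  induction l with
  | nil => intro _ acc hacc x hx; exact hacc x (by simpa using hx)
  | cons e tl ih =>
    intro hl acc hacc x hx
    simp only [List.foldl_cons] at hx
    refine ih (fun e' he' => hl e' (List.mem_cons_of_mem e he')) _ ?_ x hx
    intro z hz
    unfold pvStepB at hz
    split_ifs at hz with hc
    · rcases (PySem.Set.mem_add _ _ _).1 hz with h | rfl
      · exact hacc z h
      · have h1 : e.1 ∈ acc.1 := by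
          simp only [Bool.and_eq_true] at hc
          exact (PySem.Set.contains_iff _ _).1 hc.1
        exact hR e.1 e.2 (hacc e.1 h1) (by simpa using hl e List.mem_cons_self)
    · exact hacc z hz

theorem pvFoldB_nodup (l : List (Int × Int)) :
    ∀ acc : PySem.Set Int × Bool, acc.1.Nodup → (l.foldl pvStepB acc).1.Nodup := by
  induction l with
  | nil => intro acc h; simpa using h
  | cons e tl ih =>
    intro acc h
    simp only [List.foldl_cons]
    refine ih _ ?_
    unfold pvStepB
    split_ifs
    · exact PySem.Set.nodup_add _ _ h
    · exact h

theorem pvFoldB_false (l : List (Int × Int)) :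
    ∀ acc : PySem.Set Int × Bool, (l.foldl pvStepB acc).2 = false →
      (l.foldl pvStepB acc).1 = acc.1 ∧ ∀ e ∈ l, e.1 ∈ acc.1 → e.2 ∈ acc.1 := by
  induction l with
  | nil => intro acc _; exact ⟨rfl, by simp⟩
  | cons e tl ih =>
    intro acc hfalse
    simp only [List.foldl_cons] at hfalse ⊢
    by_cases hc : (PySem.Set.contains acc.1 e.1 && !PySem.Set.contains acc.1 e.2) = true
    · exfalso
      have : (tl.foldl pvStepB (pvStepB acc e)).2 = true := by
        refine pvFoldB_flag tl _ ?_
        unfold pvStepB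
        rw [if_pos hc]
      rw [hfalse] at this
      exact Bool.false_ne_true this
    · have hstep : pvStepB acc e = acc := by unfold pvStepB; rw [if_neg hc]
      rw [hstep] at hfalse ⊢
      obtain ⟨h1, h2⟩ := ih acc hfalse
      refine ⟨h1, ?_⟩
      intro e' he' h1'
      rcases List.mem_cons.1 he' with rfl | he'
      · by_contra h2'
        exact hc (by simp [PySem.Set.contains_iff, h1', h2'])
      · exact h2 e' he' h1'

theorem pvFoldB_new (l : List (Int × Int)) :
    ∀ acc : PySem.Set Int × Bool, acc.2 = false → (l.foldl pvStepB acc).2 = true →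
      ∃ e ∈ l, e.2 ∉ acc.1 ∧ e.2 ∈ (l.foldl pvStepB acc).1 := by
  induction l with
  | nil => intro acc h1 h2; rw [List.foldl_nil, h1] at h2; exact absurd h2 Bool.false_ne_true
  | cons e tl ih =>
    intro acc h1 h2
    simp only [List.foldl_cons] at h2 ⊢
    by_cases hc : (PySem.Set.contains acc.1 e.1 && !PySem.Set.contains acc.1 e.2) = true
    · refine ⟨e, List.mem_cons_self, ?_, ?_⟩
      · simp only [Bool.and_eq_true] at hc
        intro hmem
        rw [(PySem.Set.contains_iff acc.1 e.2).2 hmem] at hc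
        simp at hc
      · refine pvFoldB_mono tl _ e.2 ?_
        unfold pvStepB
        rw [if_pos hc]
        exact (PySem.Set.mem_add _ _ _).2 (Or.inr rfl)
    · have hstep : pvStepB acc e = acc := by unfold pvStepB; rw [if_neg hc]
      rw [hstep] at h2 ⊢
      obtain ⟨e', he', hh⟩ := ih acc h1 h2
      exact ⟨e', List.mem_cons_of_mem e he', hh⟩

-- fuel potential for the B loop: directed edges whose target is not yet visited
def pvRemB (E : List (Int × Int)) (vis : List Int) : Nat :=
  (E.filter (fun e => decide (e.2 ∉ vis))).length

theorem pvFilterLt {α : Type} (l : List α) (p q : α → Bool)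
    (h : ∀ a ∈ l, p a = true → q a = true)
    (x : α) (hx : x ∈ l) (hq : q x = true) (hp : p x = false) :
    (l.filter p).length < (l.filter q).length := by
  induction l with
  | nil => simp at hx
  | cons a tl ih =>
    have ht : ∀ b ∈ tl, p b = true → q b = true := fun b hb => h b (List.mem_cons_of_mem a hb)
    have hle : (tl.filter p).length ≤ (tl.filter q).length := by
      have := pvFilterSplit tl q p ht
      omega
    rcases List.mem_cons.1 hx with rfl | hx'
    · rw [List.filter_cons, List.filter_cons, hp, hq]
      simpa using Nat.lt_succ_of_le hle
    · have hlt := ih ht hx'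
      cases hpa : p a <;> cases hqa : q a <;>
        simp [List.filter_cons, hpa, hqa] <;> first | omega | (exfalso; have := h a List.mem_cons_self; simp [hpa, hqa] at this)

theorem pvRemB_lt (E : List (Int × Int)) (vis vis' : List Int)
    (hsub : ∀ x ∈ vis, x ∈ vis') (e : Int × Int) (he : e ∈ E)
    (h1 : e.2 ∉ vis) (h2 : e.2 ∈ vis') :
    pvRemB E vis' < pvRemB E vis := by
  refine pvFilterLt E _ _ ?_ e he (by simpa using h1) (by simpa using h2)
  intro a _ ha
  simp only [decide_eq_true_eq] at ha ⊢
  exact fun hm => ha (hsub a.2 hm)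

theorem pvSaturB_sound (E : List (Int × Int)) (R : Int → Prop)
    (hR : ∀ u v : Int, R u → (u, v) ∈ E → R v) :
    ∀ (fuel : Nat) (vis : PySem.Set Int), (∀ x ∈ vis, R x) →
      ∀ x ∈ pvSaturB E fuel vis, R x := by
  intro fuel
  induction fuel with
  | zero => intro vis hv x hx; exact hv x (by simpa [pvSaturB] using hx)
  | succ f ih =>
    intro vis hv x hx
    simp only [pvSaturB, pvRelaxB_eq] at hx
    have hres : ∀ z ∈ (E.foldl pvStepB (vis, false)).1, R z :=
      pvFoldB_sound E R hR E (fun _ h => h) (vis, false) hv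
    split_ifs at hx
    · exact ih _ hres x hx
    · exact hres x hx

theorem pvSaturB_mono (E : List (Int × Int)) :
    ∀ (fuel : Nat) (vis : PySem.Set Int) (x : Int), x ∈ vis → x ∈ pvSaturB E fuel vis := by
  intro fuel
  induction fuel with
  | zero => intro vis x hx; simpa [pvSaturB] using hx
  | succ f ih =>
    intro vis x hx
    simp only [pvSaturB, pvRelaxB_eq]
    have hm : x ∈ (E.foldl pvStepB (vis, false)).1 := pvFoldB_mono E (vis, false) x hx
    split_ifs
    · exact ih _ x hm
    · exact hm

theorem pvSaturB_nodup (E : List (Int × Int)) :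
    ∀ (fuel : Nat) (vis : PySem.Set Int), vis.Nodup → (pvSaturB E fuel vis).Nodup := by
  intro fuel
  induction fuel with
  | zero => intro vis h; simpa [pvSaturB] using h
  | succ f ih =>
    intro vis h
    simp only [pvSaturB, pvRelaxB_eq]
    have hn : (E.foldl pvStepB (vis, false)).1.Nodup := pvFoldB_nodup E (vis, false) h
    split_ifs
    · exact ih _ hn
    · exact hn

theorem pvSaturB_closed (E : List (Int × Int)) :
    ∀ (fuel : Nat) (vis : PySem.Set Int), pvRemB E vis < fuel →
      (∀ x ∈ vis, x ∈ pvSaturB E fuel vis) ∧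
      (∀ e ∈ E, e.1 ∈ pvSaturB E fuel vis → e.2 ∈ pvSaturB E fuel vis) := by
  intro fuel
  induction fuel with
  | zero => intro vis h; omega
  | succ f ih =>
    intro vis hfuel
    refine ⟨fun x hx => pvSaturB_mono E _ vis x hx, ?_⟩
    simp only [pvSaturB, pvRelaxB_eq]
    by_cases hflag : (E.foldl pvStepB (vis, false)).2 = true
    · rw [if_pos hflag]
      obtain ⟨e, he, h1, h2⟩ := pvFoldB_new E (vis, false) rfl hflag
      have hlt : pvRemB E (E.foldl pvStepB (vis, false)).1 < pvRemB E vis :=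
        pvRemB_lt E vis _ (fun x hx => pvFoldB_mono E (vis, false) x hx) e he h1 h2
      exact (ih _ (by omega)).2
    · rw [if_neg hflag]
      obtain ⟨heq, hcl⟩ := pvFoldB_false E (vis, false) (Bool.not_eq_true _ ▸ by simpa using hflag)
      rw [heq]
      exact fun e he h => hcl e he h

theorem pvAdjA_char (heights : List Int) (tunnels : List (Int × Int)) (u : Int) :
    (pvBuildGraphA heights tunnels).getD u [] =
      ((pvDirE heights tunnels).filter (fun e => e.1 == u)).map (fun e => e.2) := by
  rw [pvBuildGraphA_eq, PySem.Dict.getD_foldl_modify_append]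
  simp [PySem.Dict.getD_empty]

-- the A loop computes exactly the rooms reachable from P
theorem pvA_mem (heights : List Int) (tunnels : List (Int × Int)) (P x : Int) :
    x ∈ pvLoopA (pvBuildGraphA heights tunnels) (tunnels.length + 1) PySem.Set.empty [P] ↔
      pvReach (pvDirE heights tunnels) P x := by
  constructor
  · refine pvLoopA_sound (pvBuildGraphA heights tunnels) (pvDirE heights tunnels)
      (fun u v hv => (pvMem_adjA heights tunnels u v).1 hv)
      (pvReach (pvDirE heights tunnels) P)
      (fun u v hu hm => pvReach.tail hu hm)
      (tunnels.length + 1) PySem.Set.empty [P] ?_ ?_ x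
    · intro z hz; simp [PySem.Set.empty] at hz
    · intro z hz
      rw [List.mem_singleton.1 hz]
      exact pvReach.refl P
  · intro hr
    have hfuel : ([P] : List Int).length + pvRemA (pvDirE heights tunnels) PySem.Set.empty ≤
        tunnels.length + 1 := by
      have h1 : pvRemA (pvDirE heights tunnels) PySem.Set.empty ≤ (pvDirE heights tunnels).length :=
        List.length_filter_le _ _
      have h2 := pvDirE_length_le heights tunnels
      simp only [List.length_singleton]
      omega
    obtain ⟨hstk, hcl⟩ := pvLoopA_complete (pvBuildGraphA heights tunnels)
      (pvDirE heights tunnels) (pvAdjA_char heights tunnels)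
      (tunnels.length + 1) PySem.Set.empty [P]
      (by intro u hu; simp [PySem.Set.empty] at hu) hfuel
    induction hr with
    | refl => exact hstk P (List.mem_singleton.2 rfl)
    | tail h he ih => exact hcl _ ih _ he

-- the B saturation computes exactly the rooms reachable from P
theorem pvB_mem (heights : List Int) (tunnels : List (Int × Int)) (P x : Int) :
    x ∈ pvSaturB (pvEdgesB heights tunnels) ((pvEdgesB heights tunnels).length + 1)
        (PySem.Set.add PySem.Set.empty P) ↔
      pvReach (pvDirE heights tunnels) P x := by
  rw [pvEdgesB_eq]
  constructor
  · refine pvSaturB_sound (pvDirE heights tunnels)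
      (pvReach (pvDirE heights tunnels) P)
      (fun u v hu hm => pvReach.tail hu hm)
      ((pvDirE heights tunnels).length + 1) (PySem.Set.add PySem.Set.empty P) ?_ x
    intro z hz
    rcases (PySem.Set.mem_add _ _ _).1 hz with h | rfl
    · simp [PySem.Set.empty] at h
    · exact pvReach.refl _
  · intro hr
    have hfuel : pvRemB (pvDirE heights tunnels) (PySem.Set.add PySem.Set.empty P) <
        (pvDirE heights tunnels).length + 1 := by
      have h1 : pvRemB (pvDirE heights tunnels) (PySem.Set.add PySem.Set.empty P) ≤
          (pvDirE heights tunnels).length := List.length_filter_le _ _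
      omega
    obtain ⟨hsub, hcl⟩ := pvSaturB_closed (pvDirE heights tunnels)
      ((pvDirE heights tunnels).length + 1) (PySem.Set.add PySem.Set.empty P) hfuel
    induction hr with
    | refl => exact hsub P ((PySem.Set.mem_add _ _ _).2 (Or.inr rfl))
    | tail h he ih => exact hcl _ he ih

-- ===== VERDICT (by name: the statement is the Claim_ definition above) =====
theorem max_rooms_visited_spec : Claim_equal_max_rooms_visited := by
  unfold Claim_equal_max_rooms_visited
  intro S T P heights tunnels _ _
  unfold Spec_max_rooms_visited max_rooms_visited max_rooms_visited_alt
  have hVA : (pvLoopA (pvBuildGraphA heights tunnels) (tunnels.length + 1)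
      PySem.Set.empty [P]).Nodup :=
    pvLoopA_nodup _ _ _ _ List.nodup_nil
  have hVB : (pvSaturB (pvEdgesB heights tunnels) ((pvEdgesB heights tunnels).length + 1)
      (PySem.Set.add PySem.Set.empty P)).Nodup :=
    pvSaturB_nodup _ _ _ (PySem.Set.nodup_add _ _ List.nodup_nil)
  have hfin : (pvLoopA (pvBuildGraphA heights tunnels) (tunnels.length + 1)
        PySem.Set.empty [P]).toFinset =
      (pvSaturB (pvEdgesB heights tunnels) ((pvEdgesB heights tunnels).length + 1)
        (PySem.Set.add PySem.Set.empty P)).toFinset := by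
    apply Finset.ext
    intro a
    simp only [List.mem_toFinset]
    rw [pvA_mem heights tunnels P a, pvB_mem heights tunnels P a]
  have hlen : (pvLoopA (pvBuildGraphA heights tunnels) (tunnels.length + 1)
        PySem.Set.empty [P]).length =
      (pvSaturB (pvEdgesB heights tunnels) ((pvEdgesB heights tunnels).length + 1)
        (PySem.Set.add PySem.Set.empty P)).length := by
    rw [← List.toFinset_card_of_nodup hVA, ← List.toFinset_card_of_nodup hVB, hfin]
  simp only [PySem.Set.len, hlen]
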